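-- pv_equiv track=rewrite | github.com/karstendick/advent-of-code | 2024/day14/day14_part2.py | area_to_str
-- ===== SOURCE A (Python) =====
-- from collections import Counter
--
-- xmax = 101
--
-- ymax = 103
--
-- def area_to_str(positions):
--   s = ''
--   robots_by_pos = Counter(positions)
--   area = [[0 for _ in range(ymax)] for _ in range(xmax)]
--   for x in range(xmax):
--     for y in range(ymax):
--       area[x][y] = robots_by_pos[(x, y)]
--   for y in range(ymax):
--     for x in range(xmax):
--       if area[x][y] == 0:
--         s += '.'
--       else:
--         s += str(area[x][y])
--     s += '\n'
--   return s
-- ===== SOURCE B (Python) =====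
-- from collections import Counter
--
-- xmax = 101
-- ymax = 103
--
--
-- def area_to_str(positions):
--   grid = [['.' for _ in range(xmax)] for _ in range(ymax)]
--   for (x, y), c in Counter(positions).items():
--     if 0 <= x < xmax and 0 <= y < ymax:
--       grid[y][x] = str(c)
--   s = ''
--   for row in grid:
--     s += ''.join(row) + '\n'
--   return s
-- ===== Notes on version B (the rewrite author's own statement) =====
-- stated objective: simpler
-- what changed: Instead of filling a full xmax*ymax count table by querying the Counter at every cell and then scanning it again to build the string, B scatters each distinct robot position directly into a '.'-initialised character grid and joins the rows, touching only the occupied cells.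
import Mathlib
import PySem

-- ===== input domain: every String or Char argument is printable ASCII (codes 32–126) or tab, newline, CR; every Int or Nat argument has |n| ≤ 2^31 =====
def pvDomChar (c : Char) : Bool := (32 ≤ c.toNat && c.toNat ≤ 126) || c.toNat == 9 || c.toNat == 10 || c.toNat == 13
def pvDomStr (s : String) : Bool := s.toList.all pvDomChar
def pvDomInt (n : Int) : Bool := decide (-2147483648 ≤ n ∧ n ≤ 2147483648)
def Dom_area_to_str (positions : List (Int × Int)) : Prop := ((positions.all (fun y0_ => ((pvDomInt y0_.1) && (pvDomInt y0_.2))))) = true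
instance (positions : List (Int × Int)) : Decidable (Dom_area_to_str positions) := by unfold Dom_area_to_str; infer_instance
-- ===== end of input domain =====

-- B renders the grid by scattering each distinct robot position (from the Counter) into a
-- '.'-initialised row list and joining the rows, instead of A's filling a full count table by
-- querying the Counter at every cell and scanning it again; same return value, objective: simpler.

-- ===== PORT A =====
def xmax : Int := 101
def ymax : Int := 103

def area_to_str (positions : List (Int × Int)) : String :=
  let robots_by_pos := PySem.Dict.counter positions
  let area : List (List Int) :=
    (PySem.List.pyRange 0 xmax 1).map (fun _ => (PySem.List.pyRange 0 ymax 1).map (fun _ => 0))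
  let area := (PySem.List.pyRange 0 xmax 1).foldl (fun area x =>
    (PySem.List.pyRange 0 ymax 1).foldl (fun area y =>
      PySem.List.pySetD area x
        (PySem.List.pySetD (PySem.List.pyGetD area x []) y (robots_by_pos.getD (x, y) 0))) area) area
  (PySem.List.pyRange 0 ymax 1).foldl (fun s y =>
    ((PySem.List.pyRange 0 xmax 1).foldl (fun s x =>
      if PySem.List.pyGetD (PySem.List.pyGetD area x []) y 0 = 0 then s ++ "."
      else s ++ PySem.Int.toStr (PySem.List.pyGetD (PySem.List.pyGetD area x []) y 0)) s) ++ "\n") ""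

-- ===== PORT B =====
def area_to_str_alt (positions : List (Int × Int)) : String :=
  let grid : List (List String) :=
    (PySem.List.pyRange 0 ymax 1).map (fun _ => (PySem.List.pyRange 0 xmax 1).map (fun _ => "."))
  let grid := (PySem.Dict.counter positions).items.foldl (fun grid pc =>
    if 0 ≤ pc.1.1 ∧ pc.1.1 < xmax ∧ 0 ≤ pc.1.2 ∧ pc.1.2 < ymax then
      PySem.List.pySetD grid pc.1.2
        (PySem.List.pySetD (PySem.List.pyGetD grid pc.1.2 []) pc.1.1 (PySem.Int.toStr pc.2))
    else grid) grid
  grid.foldl (fun s row => s ++ PySem.Str.join "" row ++ "\n") ""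

-- ===== PRECONDITION & SPEC =====
def Spec_area_to_str (positions : List (Int × Int)) (out : String) : Prop := out = area_to_str_alt positions
instance (positions : List (Int × Int)) (out : String) : Decidable (Spec_area_to_str positions out) := by unfold Spec_area_to_str; infer_instance

-- ===== CLAIM (what is proved, stated in full; the proofs are below) =====
def Claim_equal_area_to_str : Prop := ∀ (positions : List (Int × Int)), Dom_area_to_str positions → Spec_area_to_str positions (area_to_str positions)

-- ===== LEMMAS AND PROOFS =====

-- the common reference rendering both ports are reduced to
def pvCell (positions : List (Int × Int)) (x y : Nat) : String :=
  if ((List.count ((x : Int), (y : Int)) positions : Int) = 0) then "."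
  else PySem.Int.toStr (List.count ((x : Int), (y : Int)) positions : Int)

def pvRender (positions : List (Int × Int)) : String :=
  (List.range 103).foldl
    (fun s y => s ++ PySem.Str.join "" ((List.range 101).map (fun x => pvCell positions x y)) ++ "\n") ""

theorem pv_join_nil : PySem.Str.join "" ([] : List String) = "" := by
  simp [PySem.Str.join, PySem.Chars.join_nil]

theorem pv_join_cons (a : String) (l : List String) :
    PySem.Str.join "" (a :: l) = a ++ PySem.Str.join "" l := by
  cases l with
  | nil => simp [PySem.Str.join, PySem.Chars.join_singleton, PySem.Chars.join_nil]
  | cons b rest =>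
      simp only [PySem.Str.join, List.map_cons, PySem.Chars.join_cons_cons]
      simp [String.ofList_append]

theorem pv_foldl_str {α : Type} (l : List α) (f : α → String) (s : String) :
    l.foldl (fun s x => s ++ f x) s = s ++ PySem.Str.join "" (l.map f) := by
  induction l generalizing s with
  | nil => simp [pv_join_nil]
  | cons a t ih => simp [ih, pv_join_cons, String.append_assoc]

theorem pv_fill_const {α : Type} (g : Nat → α) (r : List α) :
    ∀ n, n ≤ r.length →
    (List.range n).foldl (fun a k => a.set k (g k)) r
      = (List.range n).map g ++ r.drop n := by
  intro n hn
  induction n with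
  | zero => simp
  | succ n ih =>
      rw [List.range_succ, List.foldl_append, ih (by omega)]
      simp only [List.foldl_cons, List.foldl_nil]
      have hlen : ((List.range n).map g).length = n := by simp
      rw [List.set_append, if_neg (by omega), hlen]
      rw [List.drop_eq_getElem_cons (show n < r.length by omega), Nat.sub_self]
      rw [List.set_cons_zero]
      simp

theorem pv_set_outer {β : Type} (step : List β → Nat → List β) (m : Nat) (x : Nat)
    (a : List (List β)) (hx : x < a.length) :
    (List.range m).foldl (fun a y => a.set x (step (a.getD x []) y)) a
      = a.set x ((List.range m).foldl step (a.getD x [])) := by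
  induction m with
  | zero =>
      simp only [List.range_zero, List.foldl_nil]
      exact (List.ext_getElem (by simp) (fun i h1 h2 => by
        rw [List.getElem_set]
        split <;> simp_all [List.getD_eq_getElem?_getD])).symm
  | succ n ih =>
      rw [List.range_succ, List.foldl_append, List.foldl_append, ih]
      simp only [List.foldl_cons, List.foldl_nil]
      rw [List.getD_eq_getElem?_getD (l := a.set x _), List.getElem?_set_self (by simpa using hx),
        List.set_set]
      rfl

theorem pv_outer_fill (X Y : Nat) (f : Nat → Nat → Int) (init : List (List Int))
    (hlen : init.length = X)
    (hrow : ∀ k, k < X → init.getD k [] = (List.range Y).map (fun _ => (0:Int))) :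
    ∀ n, n ≤ X →
    (List.range n).foldl
      (fun a x => (List.range Y).foldl (fun a y => a.set x ((a.getD x []).set y (f x y))) a)
      init
    = (List.range n).map (fun x => (List.range Y).map (fun y => f x y)) ++ init.drop n := by
  intro n hn
  induction n with
  | zero => simp
  | succ n ih =>
      rw [List.range_succ, List.foldl_append, ih (by omega)]
      simp only [List.foldl_cons, List.foldl_nil]
      have hlenM : ((List.range n).map (fun x => (List.range Y).map (fun y => f x y))).length = n := by
        simp
      have hgd : (((List.range n).map (fun x => (List.range Y).map (fun y => f x y)))
          ++ init.drop n).getD n [] = (List.range Y).map (fun _ => (0:Int)) := by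
        rw [List.getD_append_right _ _ _ _ (by omega), hlenM, Nat.sub_self]
        have h5 := hrow n (by omega)
        rw [List.getD_eq_getElem?_getD] at h5 ⊢
        rw [List.getElem?_drop, Nat.add_zero]
        exact h5
      rw [pv_set_outer (fun r y => r.set y (f n y)) Y n _ (by simp [hlen]; omega), hgd]
      rw [pv_fill_const (fun y => f n y) _ Y (by simp)]
      rw [show List.drop Y ((List.range Y).map (fun _ => (0:Int))) = [] by simp, List.append_nil]
      rw [List.set_append, if_neg (by omega), hlenM, Nat.sub_self]
      rw [List.drop_eq_getElem_cons (show n < init.length by omega)]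
      rw [List.set_cons_zero]
      simp [List.map_append]

theorem pv_map_range_set {α : Type} (n : Nat) (f : Nat → α) (A : Nat) (v : α) :
    ((List.range n).map f).set A v = (List.range n).map (fun x => if x = A then v else f x) := by
  apply List.ext_getElem (by simp)
  intro i h1 h2
  rw [List.getElem_set]
  simp only [List.getElem_map, List.getElem_range]
  by_cases hi : A = i
  · simp [hi]
  · rw [if_neg hi, if_neg (fun h => hi h.symm)]

theorem pv_find_eq_self {γ : Type} [BEq γ] [LawfulBEq γ] (l : List γ) (v : γ) :
    l.find? (fun k => k == v) = if v ∈ l then some v else none := by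
  induction l with
  | nil => simp
  | cons a t ih =>
      by_cases hav : a = v
      · subst hav; simp
      · rw [List.find?_cons_of_neg (by simpa using hav), ih]
        have hmem : (v ∈ a :: t) ↔ (v ∈ t) := by
          constructor
          · intro hm
            rcases List.mem_cons.mp hm with hm | hm
            · exact absurd hm.symm hav
            · exact hm
          · exact fun hm => List.mem_cons_of_mem _ hm
        by_cases hm : v ∈ t
        · rw [if_pos hm, if_pos (List.mem_cons_of_mem _ hm)]
        · rw [if_neg hm, if_neg (fun hc => hm (hmem.mp hc))]

theorem pv_scatter (L : List ((Int × Int) × Int)) :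
    ∀ (h : Nat → Nat → String),
    (L.map (fun pc => pc.1)).Nodup →
    L.foldl (fun grid pc =>
        if 0 ≤ pc.1.1 ∧ pc.1.1 < 101 ∧ 0 ≤ pc.1.2 ∧ pc.1.2 < 103 then
          PySem.List.pySetD grid pc.1.2
            (PySem.List.pySetD (PySem.List.pyGetD grid pc.1.2 []) pc.1.1 (PySem.Int.toStr pc.2))
        else grid)
      ((List.range 103).map (fun y => (List.range 101).map (fun x => h x y)))
    = (List.range 103).map (fun (y : Nat) => (List.range 101).map (fun (x : Nat) =>
        match L.find? (fun pc => pc.1 == ((x:Int),(y:Int))) with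
        | some pc => PySem.Int.toStr pc.2
        | none => h x y)) := by
  induction L with
  | nil => intro h _; simp
  | cons pc t ih =>
      intro h hnd
      simp only [List.foldl_cons]
      rw [List.map_cons] at hnd
      obtain ⟨hhead, hnd'⟩ := List.nodup_cons.mp hnd
      by_cases hg : 0 ≤ pc.1.1 ∧ pc.1.1 < 101 ∧ 0 ≤ pc.1.2 ∧ pc.1.2 < 103
      · obtain ⟨h1, h2, h3, h4⟩ := hg
        rw [if_pos ⟨h1, h2, h3, h4⟩]
        set G := (List.range 103).map (fun y => (List.range 101).map (fun x => h x y)) with hG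
        have hGlen : G.length = 103 := by simp [hG]
        have hread : PySem.List.pyGetD G pc.1.2 [] = (List.range 101).map (fun x => h x pc.1.2.toNat) := by
          rw [PySem.List.pyGetD_eq_getElem G [] h3 (by rw [hGlen]; exact_mod_cast h4)]
          simp [hG]
        rw [hread, PySem.List.pySetD_of_nonneg _ _ h1, PySem.List.pySetD_of_nonneg _ _ h3]
        rw [pv_map_range_set 101, hG, pv_map_range_set 103]
        have hshape : (List.range 103).map (fun y =>
              if y = pc.1.2.toNat
              then (List.range 101).map (fun x => if x = pc.1.1.toNat then PySem.Int.toStr pc.2 else h x pc.1.2.toNat)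
              else (List.range 101).map (fun x => h x y))
            = (List.range 103).map (fun y => (List.range 101).map (fun x =>
                if x = pc.1.1.toNat ∧ y = pc.1.2.toNat then PySem.Int.toStr pc.2 else h x y)) := by
          apply List.map_congr_left
          intro y hy
          by_cases hyB : y = pc.1.2.toNat
          · subst hyB; simp
          · simp [hyB]
        rw [hshape, ih _ hnd']
        apply List.map_congr_left
        intro y hy
        apply List.map_congr_left
        intro x hx
        rw [List.mem_range] at hy hx
        by_cases hkey : pc.1 = ((x:Int),(y:Int))
        · rw [List.find?_cons_of_pos (by simpa using hkey)]
          have hfind : t.find? (fun q => q.1 == ((x:Int),(y:Int))) = none := by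
            rw [List.find?_eq_none]
            intro q hq hq'
            have hq2 : q.1 = ((x:Int),(y:Int)) := by simpa using hq'
            have hq3 : q.1 = pc.1 := by rw [hq2, hkey]
            exact hhead (hq3 ▸ List.mem_map_of_mem hq)
          rw [hfind]
          have hx' : x = pc.1.1.toNat := by
            have := congrArg Prod.fst hkey; simp at this; omega
          have hy' : y = pc.1.2.toNat := by
            have := congrArg Prod.snd hkey; simp at this; omega
          simp [hx', hy']
        · rw [List.find?_cons_of_neg (by simpa using hkey)]
          cases hfind : t.find? (fun q => q.1 == ((x:Int),(y:Int))) with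
          | some q => simp
          | none =>
              simp only []
              have : ¬ (x = pc.1.1.toNat ∧ y = pc.1.2.toNat) := by
                rintro ⟨rfl, rfl⟩
                apply hkey
                rw [Prod.ext_iff]
                constructor <;> simp <;> omega
              simp [this]
      · rw [if_neg hg, ih _ hnd']
        apply List.map_congr_left
        intro y hy
        apply List.map_congr_left
        intro x hx
        rw [List.mem_range] at hy hx
        rw [List.find?_cons_of_neg]
        simp only [beq_iff_eq]
        intro hkey
        apply hg
        rw [hkey]
        refine ⟨?_, ?_, ?_, ?_⟩
        · show (0:Int) ≤ (x:Int); positivity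
        · show ((x:Int)) < 101; exact_mod_cast hx
        · show (0:Int) ≤ (y:Int); positivity
        · show ((y:Int)) < 103; exact_mod_cast hy

theorem pv_A_eq (positions : List (Int × Int)) : area_to_str positions = pvRender positions := by
  unfold area_to_str pvRender
  simp only [xmax, ymax, PySem.List.pyRange_zero, show Int.toNat 101 = 101 from rfl,
    show Int.toNat 103 = 103 from rfl, List.foldl_map, List.map_map, Function.comp_def,
    PySem.List.pySetD_natCast, PySem.List.pyGetD_natCast, PySem.Dict.getD_counter]
  rw [pv_outer_fill 101 103 (fun x y => ((List.count ((x:Int),(y:Int)) positions : Int))) _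
    (by simp)
    (fun k hk => PySem.List.getD_map_range _ 101 k [] hk)
    101 le_rfl]
  rw [show List.drop 101 (List.map (fun (_ : Nat) => List.map (fun (_ : Nat) => (0:Int)) (List.range 103)) (List.range 101)) = [] from by simp,
    List.append_nil]
  apply PySem.List.foldl_congr_mem
  intro s y hy
  have hyy : y < 103 := List.mem_range.mp hy
  have hinner : List.foldl
      (fun s x => if (((List.range 101).map (fun (x : Nat) => (List.range 103).map (fun (y : Nat) => (List.count ((x:Int),(y:Int)) positions : Int)))).getD x []).getD y 0 = 0
        then s ++ "."
        else s ++ PySem.Int.toStr ((((List.range 101).map (fun (x : Nat) => (List.range 103).map (fun (y : Nat) => (List.count ((x:Int),(y:Int)) positions : Int)))).getD x []).getD y 0))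
      s (List.range 101)
      = s ++ PySem.Str.join "" ((List.range 101).map (fun x => pvCell positions x y)) := by
    refine (PySem.List.foldl_congr_mem _ _ (fun s x => s ++ pvCell positions x y) s ?_).trans
      (pv_foldl_str _ _ s)
    intro s' x hx
    have hxx : x < 101 := List.mem_range.mp hx
    rw [PySem.List.getD_map_range _ _ _ _ hxx, PySem.List.getD_map_range _ _ _ _ hyy]
    unfold pvCell
    by_cases h : List.count ((x:Int),(y:Int)) positions = 0
    · simp [h]
    · simp [h]
  rw [hinner, String.append_assoc]

theorem pv_B_eq (positions : List (Int × Int)) : area_to_str_alt positions = pvRender positions := by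
  unfold area_to_str_alt pvRender
  simp only [xmax, ymax, PySem.List.pyRange_zero, show Int.toNat 101 = 101 from rfl,
    show Int.toNat 103 = 103 from rfl, List.map_map, Function.comp_def]
  rw [PySem.Dict.items_counter]
  have hs : List.foldl (fun grid pc =>
        if 0 ≤ pc.1.1 ∧ pc.1.1 < 101 ∧ 0 ≤ pc.1.2 ∧ pc.1.2 < 103 then
          PySem.List.pySetD grid pc.1.2
            (PySem.List.pySetD (PySem.List.pyGetD grid pc.1.2 []) pc.1.1 (PySem.Int.toStr pc.2))
        else grid)
      (List.map (fun (_ : Nat) => List.map (fun (_ : Nat) => ".") (List.range 101)) (List.range 103))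
      (List.map (fun k => (k, (List.count k positions : Int))) (PySem.Set.ofList positions)) = _ :=
    pv_scatter ((PySem.Set.ofList positions).map (fun k => (k, (List.count k positions : Int))))
      (fun _ _ => ".")
      (by
        rw [List.map_map]
        have hid : ((fun (pc : (Int × Int) × Int) => pc.1) ∘
            fun k => (k, (List.count k positions : Int))) = id := rfl
        rw [hid, List.map_id]
        exact PySem.Set.nodup_ofList positions)
  refine Eq.trans (congrArg (List.foldl (fun s row => s ++ PySem.Str.join "" row ++ "\n") "") hs) ?_
  rw [List.foldl_map]
  apply PySem.List.foldl_congr_mem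
  intro s y hy
  have hyy : y < 103 := List.mem_range.mp hy
  have hrow : (List.range 101).map (fun (x : Nat) =>
      match List.find? (fun pc => pc.1 == ((x:Int),(y:Int)))
          ((PySem.Set.ofList positions).map (fun k => (k, (List.count k positions : Int)))) with
      | some pc => PySem.Int.toStr pc.2
      | none => ".")
      = (List.range 101).map (fun x => pvCell positions x y) := by
    apply List.map_congr_left
    intro x hx
    have hf : List.find? (fun pc => pc.1 == ((x:Int),(y:Int)))
        ((PySem.Set.ofList positions).map (fun k => (k, (List.count k positions : Int))))
        = (if ((x:Int),(y:Int)) ∈ PySem.Set.ofList positions then some ((x:Int),(y:Int)) else none).map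
            (fun k => (k, (List.count k positions : Int))) := by
      rw [List.find?_map,
        show ((fun (pc : (Int × Int) × Int) => pc.1 == ((x:Int),(y:Int))) ∘
            (fun k => (k, (List.count k positions : Int)))) = (fun k => k == ((x:Int),(y:Int))) from rfl,
        pv_find_eq_self]
    rw [hf]
    by_cases hm : ((x:Int),(y:Int)) ∈ positions
    · rw [if_pos ((PySem.Set.mem_ofList positions _).mpr hm)]
      simp only [Option.map_some]
      unfold pvCell
      rw [if_neg (by exact_mod_cast (fun h0 => (List.count_eq_zero.mp h0) hm))]
    · rw [if_neg (fun hc => hm ((PySem.Set.mem_ofList positions _).mp hc))]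
      simp only [Option.map_none]
      unfold pvCell
      rw [if_pos (by exact_mod_cast List.count_eq_zero.mpr hm)]
  rw [hrow]

-- ===== VERDICT (by name: the statement is the Claim_ definition above) =====
theorem area_to_str_spec : Claim_equal_area_to_str := by
  intro positions _
  unfold Spec_area_to_str
  rw [pv_A_eq, pv_B_eq]
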